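-- pv_equiv track=rewrite | github.com/kimjune01/metacognition | results/round2/frontier/bare-sonnet-3.py | solve_constraints
-- ===== SOURCE A (Python) =====
-- def solve_constraints(n: int, constraints: list[tuple[str, int, int]]) -> list[int]:
--     from itertools import permutations
--
--     def is_valid(assignment):
--         for ctype, i, j in constraints:
--             if ctype == 'lt':
--                 if assignment[i] >= assignment[j]:
--                     return False
--             elif ctype == 'diff':
--                 if abs(assignment[i] - assignment[j]) < 2:
--                     return False
--             elif ctype == 'adj':
--                 if abs(assignment[i] - assignment[j]) != 1:
--                     return False
--         return True
--
--     # For small n, try all permutations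
--     if n <= 8:
--         for perm in permutations(range(1, n + 1)):
--             if is_valid(perm):
--                 return list(perm)
--         return []
--
--     # For larger n, use backtracking with constraint propagation
--     def backtrack(assignment, remaining):
--         if not remaining:
--             if is_valid(assignment):
--                 return assignment[:]
--             return None
--
--         slot = len(assignment)
--         for value in sorted(remaining):
--             assignment.append(value)
--             new_remaining = remaining - {value}
--
--             # Check constraints involving this slot
--             valid = True
--             for ctype, i, j in constraints:
--                 if j == slot and i < slot:
--                     if ctype == 'lt' and assignment[i] >= assignment[j]:
--                         valid = False
--                         break
--                     elif ctype == 'diff' and abs(assignment[i] - assignment[j]) < 2: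
--                         valid = False
--                         break
--                     elif ctype == 'adj' and abs(assignment[i] - assignment[j]) != 1:
--                         valid = False
--                         break
--                 elif i == slot and j < slot:
--                     if ctype == 'lt' and assignment[i] >= assignment[j]:
--                         valid = False
--                         break
--                     elif ctype == 'diff' and abs(assignment[i] - assignment[j]) < 2:
--                         valid = False
--                         break
--                     elif ctype == 'adj' and abs(assignment[i] - assignment[j]) != 1:
--                         valid = False
--                         break
--
--             if valid:
--                 result = backtrack(assignment, new_remaining)
--                 if result is not None:
--                     return result
--
--             assignment.pop()
--
--         return None
--
--     result = backtrack([], set(range(1, n + 1)))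
--     return result if result is not None else []
-- ===== SOURCE B (Python) =====
-- def solve_constraints(n: int, constraints: list[tuple[str, int, int]]) -> list[int]:
--     # Forward-checking search: every unfilled slot keeps a candidate domain;
--     # assigning slot k applies each constraint touching k once, to the single
--     # future domain it targets (untouched domains are shared, not copied).
--     def conflict(t, x, y):
--         if t == 'lt':
--             return x >= y
--         if t == 'diff':
--             return abs(x - y) < 2
--         if t == 'adj':
--             return abs(x - y) != 1
--         return False
--
--     def full_valid(a):
--         for t, i, j in constraints:
--             if (t == 'lt' or t == 'diff' or t == 'adj') and conflict(t, a[i], a[j]):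
--                 return False
--         return True
--
--     used = set()
--
--     def search(a, domains):
--         if not domains:
--             return list(a) if full_valid(a) else None
--         k = len(a)
--         for v in domains[0]:
--             if v in used:
--                 continue
--             nds = domains[1:]
--             for t, i, j in constraints:
--                 if t != 'lt' and t != 'diff' and t != 'adj':
--                     continue
--                 if i == k and k < j:
--                     nds[j - k - 1] = [w for w in nds[j - k - 1] if not conflict(t, v, w)]
--                 elif j == k and k < i:
--                     nds[i - k - 1] = [w for w in nds[i - k - 1] if not conflict(t, w, v)]
--             a.append(v)
--             used.add(v)
--             r = search(a, nds)
--             if r is not None: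
--                 return r
--             a.pop()
--             used.discard(v)
--         return None
--
--     vals = list(range(1, n + 1))
--     r = search([], [vals] * n)
--     return r if r is not None else []
-- ===== Notes on version B (the rewrite author's own statement) =====
-- stated objective: alternative
-- what changed: Replaces A's dispatch between a full-permutation scan (n<=8) and backward-checking backtracking over a remaining set (n>8) by a single forward-checking search: every unfilled slot keeps an explicit candidate domain, and assigning a slot filters the future domains, so no constraint check against already-assigned slots is done when a slot is reached.
-- outside the precondition, e.g. on solve_constraints(9, [('lt', -1, 1)]): A returns [], B returns [1, 3, 4, 5, 6, 7, 8, 9, 2]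
import Mathlib
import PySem

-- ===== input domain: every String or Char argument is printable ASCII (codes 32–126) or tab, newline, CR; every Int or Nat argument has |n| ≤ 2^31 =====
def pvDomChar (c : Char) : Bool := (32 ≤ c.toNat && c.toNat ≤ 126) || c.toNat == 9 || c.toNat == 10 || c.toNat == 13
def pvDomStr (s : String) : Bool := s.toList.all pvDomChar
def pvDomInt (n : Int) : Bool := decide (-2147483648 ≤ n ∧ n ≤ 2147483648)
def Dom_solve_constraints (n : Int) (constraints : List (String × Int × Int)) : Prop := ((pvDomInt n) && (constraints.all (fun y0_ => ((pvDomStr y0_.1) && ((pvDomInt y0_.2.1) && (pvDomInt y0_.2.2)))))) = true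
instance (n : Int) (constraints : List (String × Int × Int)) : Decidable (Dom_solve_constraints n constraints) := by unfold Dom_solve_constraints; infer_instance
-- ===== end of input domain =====

-- B replaces A's permutation-scan / backward-checking dispatch by a single forward-checking search over per-slot candidate domains (objective: alternative); equal return value proved on Pre_.

-- ===== PORT A =====
-- assignment[i] (Python indexing, negative wraps); the default is never reached under Pre_ (IndexError inputs are excluded)
def pvGet (a : List Int) (i : Int) : Int := (PySem.List.pyGet? a i).getD 0

-- the per-constraint test of is_valid as a function of the two indexed values
def pvCheckV (t : String) (x y : Int) : Bool :=
  if t == "lt" then decide (x < y)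
  else if t == "diff" then decide (2 ≤ |x - y|)
  else if t == "adj" then decide (|x - y| = 1)
  else true

def pvCheck (a : List Int) (c : String × Int × Int) : Bool :=
  pvCheckV c.1 (pvGet a c.2.1) (pvGet a c.2.2)

def pvIsValid (cs : List (String × Int × Int)) (a : List Int) : Bool := cs.all (pvCheck a)

-- A's pruning loop: a constraint is checked iff one endpoint is the current slot and the other an earlier one
def pruneA (cs : List (String × Int × Int)) (a2 : List Int) (slot : Int) : Bool :=
  cs.all (fun c =>
    if (c.2.2 == slot && decide (c.2.1 < slot)) || (c.2.1 == slot && decide (c.2.2 < slot))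
    then pvCheck a2 c else true)

-- A's backtrack(assignment, remaining); fuel = |remaining| at every call, so fuel 0 ↔ 'not remaining';
-- 'remaining - {v}' on the duplicate-free set-list is List.erase; the early-returning for-loop is findSome?
def btA (cs : List (String × Int × Int)) : Nat → List Int → List Int → Option (List Int)
  | 0, a, _ => if pvIsValid cs a then some a else none
  | f+1, a, rem =>
      (PySem.List.sorted rem (fun x => x) false).findSome? (fun v =>
        if pruneA cs (a ++ [v]) ((a.length : Int)) then btA cs f (a ++ [v]) (rem.erase v)
        else none)

def solve_constraints (n : Int) (constraints : List (String × Int × Int)) : List Int :=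
  if n ≤ 8 then
    match (PySem.List.permutations (PySem.List.pyRange 1 (n+1) 1)
            (PySem.List.pyRange 1 (n+1) 1).length).find? (fun p => pvIsValid constraints p) with
    | some p => p
    | none => []
  else
    match btA constraints (PySem.Set.ofList (PySem.List.pyRange 1 (n+1) 1)).length []
            (PySem.Set.ofList (PySem.List.pyRange 1 (n+1) 1)) with
    | some r => r
    | none => []

-- ===== PORT B =====
-- B's conflict(t, x, y)
def conflictB (t : String) (x y : Int) : Bool :=
  if t == "lt" then decide (y ≤ x)
  else if t == "diff" then decide (|x - y| < 2)
  else if t == "adj" then decide (|x - y| ≠ 1)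
  else false

-- the recognized-type test (t == 'lt' or t == 'diff' or t == 'adj')
def recogB (t : String) : Bool := t == "lt" || t == "diff" || t == "adj"

-- B's full_valid
def fullValidB (cs : List (String × Int × Int)) (a : List Int) : Bool :=
  cs.all (fun c => !(recogB c.1 && conflictB c.1 (pvGet a c.2.1) (pvGet a c.2.2)))

-- one iteration of B's constraint loop at slot k with chosen value v:
-- a recognized constraint filters the single future domain it targets (index j-k-1 into domains[1:])
def updOne (k v : Int) (nds : List (List Int)) (c : String × Int × Int) : List (List Int) :=
  if !recogB c.1 then nds
  else if c.2.1 == k && decide (k < c.2.2) then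
    nds.modify (c.2.2 - k - 1).toNat (fun d => d.filter (fun w => !conflictB c.1 v w))
  else if c.2.2 == k && decide (k < c.2.1) then
    nds.modify (c.2.1 - k - 1).toNat (fun d => d.filter (fun w => !conflictB c.1 w v))
  else nds

-- B's 'for t, i, j in constraints: …' update loop
def updDoms (cs : List (String × Int × Int)) (k v : Int) (nds : List (List Int)) : List (List Int) :=
  cs.foldl (updOne k v) nds

-- (termination helper for btF)
theorem length_updOne (k v : Int) (nds : List (List Int)) (c : String × Int × Int) :
    (updOne k v nds c).length = nds.length := by
  unfold updOne
  split_ifs <;> simp [List.length_modify]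

theorem length_updDoms (cs : List (String × Int × Int)) (k v : Int) :
    ∀ nds : List (List Int), (updDoms cs k v nds).length = nds.length := by
  induction cs with
  | nil => intro nds; rfl
  | cons c t ih =>
      intro nds
      have h : updDoms (c :: t) k v nds = updDoms t k v (updOne k v nds c) := rfl
      rw [h, ih, length_updOne]

-- B's search(a, domains); the 'used' set always holds exactly the elements of a
def btF (cs : List (String × Int × Int)) : List Int → List (List Int) → Option (List Int)
  | a, [] => if fullValidB cs a then some a else none
  | a, d0 :: ds =>
      d0.findSome? (fun v =>
        if v ∈ a then none
        else btF cs (a ++ [v]) (updDoms cs ((a.length : Int)) v ds))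
  termination_by _ doms => doms.length
  decreasing_by simp [length_updDoms]

def solve_constraints_alt (n : Int) (constraints : List (String × Int × Int)) : List Int :=
  match btF constraints [] (List.replicate n.toNat (PySem.List.pyRange 1 (n+1) 1)) with
  | some r => r
  | none => []

-- ===== PRECONDITION & SPEC =====
-- Pre_ excludes recognized constraints whose indices are outside Python's indexable range [-n, n) (A raises
-- IndexError there), and, for n > 8 only, negative indices: there A's pruning wraps them around into the
-- PARTIAL assignment, where it can itself raise IndexError or prune on accidental values, so no single value is specified.
def Pre_solve_constraints (n : Int) (constraints : List (String × Int × Int)) : Prop :=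
  ∀ c ∈ constraints, (c.1 = "lt" ∨ c.1 = "diff" ∨ c.1 = "adj") →
    if n ≤ 8 then -n ≤ c.2.1 ∧ c.2.1 < n ∧ -n ≤ c.2.2 ∧ c.2.2 < n
    else 0 ≤ c.2.1 ∧ c.2.1 < n ∧ 0 ≤ c.2.2 ∧ c.2.2 < n
instance (n : Int) (constraints : List (String × Int × Int)) : Decidable (Pre_solve_constraints n constraints) := by
  unfold Pre_solve_constraints; infer_instance

def pvWitness_solve_constraints : Int × (List (String × Int × Int)) := (3, [("lt", 0, 2)])

def Spec_solve_constraints (n : Int) (constraints : List (String × Int × Int)) (out : List Int) : Prop := out = solve_constraints_alt n constraints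
instance (n : Int) (constraints : List (String × Int × Int)) (out : List Int) : Decidable (Spec_solve_constraints n constraints out) := by unfold Spec_solve_constraints; infer_instance

-- ===== CLAIM (what is proved, stated in full; the proofs are below) =====
def Claim_equal_solve_constraints : Prop := ∀ (n : Int) (constraints : List (String × Int × Int)), Dom_solve_constraints n constraints → Pre_solve_constraints n constraints → Spec_solve_constraints n constraints (solve_constraints n constraints)

-- ===== LEMMAS AND PROOFS =====

-- the common specification both searches compute: first valid extension of a by a permutation of rem, lex order
def perms1 (l : List Int) : List (List Int) := PySem.List.permutations l l.length
def sortI (l : List Int) : List Int := PySem.List.sorted l (fun x => x) false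
def specFind (cs : List (String × Int × Int)) (a rem : List Int) : Option (List Int) :=
  ((perms1 (sortI rem)).map (fun p => a ++ p)).find? (pvIsValid cs)

-- the nonnegativity part of Pre_ that A's pruning-soundness argument uses
def PreNN (cs : List (String × Int × Int)) : Prop :=
  ∀ c ∈ cs, (c.1 = "lt" ∨ c.1 = "diff" ∨ c.1 = "adj") → 0 ≤ c.2.1 ∧ 0 ≤ c.2.2

theorem find?_flatMap {α β : Type} (p : β → Bool) (g : α → List β) :
    ∀ vs : List α, (vs.flatMap g).find? p = vs.findSome? (fun v => (g v).find? p) := by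
  intro vs
  induction vs with
  | nil => simp
  | cons v t ih =>
      simp only [List.flatMap_cons, List.find?_append, List.findSome?_cons, ih]
      cases (g v).find? p <;> simp [Option.or]

theorem findSome?_ext {α β : Type} (f g : α → Option β) :
    ∀ vs : List α, (∀ x ∈ vs, f x = g x) → vs.findSome? f = vs.findSome? g := by
  intro vs
  induction vs with
  | nil => simp
  | cons v t ih =>
      intro h
      simp only [List.findSome?_cons, h v (by simp)]
      cases g v with
      | some b => rfl
      | none => exact ih (fun x hx => h x (by simp [hx]))

theorem flatMap_range_getElem_eraseIdx {β : Type} :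
    ∀ (s : List Int), s.Nodup → ∀ (F : Int → List Int → List β),
      (List.range s.length).flatMap (fun i => F (s.getD i 0) (s.eraseIdx i))
        = s.flatMap (fun v => F v (s.erase v)) := by
  intro s
  induction s with
  | nil => intro _ F; simp
  | cons v t ih =>
      intro hnd F
      have hv : v ∉ t := (List.nodup_cons.mp hnd).1
      have hnt : t.Nodup := (List.nodup_cons.mp hnd).2
      rw [List.length_cons, List.range_succ_eq_map, List.flatMap_cons, List.flatMap_map]
      have h1 : (fun i => F ((v :: t).getD (Nat.succ i) 0) ((v :: t).eraseIdx (Nat.succ i)))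
          = fun i => F (t.getD i 0) (v :: t.eraseIdx i) := by
        funext i; rfl
      rw [h1, ih hnt (fun w l => F w (v :: l))]
      rw [List.flatMap_cons, List.erase_cons_head]
      congr 1
      apply List.flatMap_congr
      intro w hw
      have hne : v ≠ w := fun h => hv (h ▸ hw)
      rw [List.erase_cons_tail (by simp [hne])]

theorem perms1_decomp (s : List Int) (hnd : s.Nodup) (hne : s ≠ []) :
    perms1 s = s.flatMap (fun v => (perms1 (s.erase v)).map (fun p => v :: p)) := by
  obtain ⟨m, hm⟩ : ∃ m, s.length = m + 1 := by
    cases s with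
    | nil => exact absurd rfl hne
    | cons x t => exact ⟨t.length, rfl⟩
  unfold perms1
  rw [hm, PySem.List.permutations.eq_2]
  trans ((List.range s.length).flatMap
      (fun i => (PySem.List.permutations (s.eraseIdx i) m).map (fun p => s.getD i 0 :: p)))
  · apply List.flatMap_congr
    intro i hi
    have hi' : i < s.length := List.mem_range.mp hi
    rw [List.getElem?_eq_getElem hi', List.getD_eq_getElem s 0 hi']
  rw [flatMap_range_getElem_eraseIdx s hnd (fun v l => (PySem.List.permutations l m).map (fun p => v :: p))]
  apply List.flatMap_congr
  intro v hvs
  have : (s.erase v).length = m := by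
    rw [List.length_erase_of_mem hvs, hm]
    omega
  rw [this]

theorem sortI_nil : sortI [] = [] := by decide

theorem pairwise_lt_sortI (rem : List Int) (hnd : rem.Nodup) :
    (sortI rem).Pairwise (· < ·) := by
  have hle : (sortI rem).Pairwise (fun a b => (fun x : Int => x) a ≤ (fun x : Int => x) b) :=
    PySem.List.sorted_pairwise rem (fun x => x)
  have hnd' : (sortI rem).Nodup := ((PySem.List.sorted_perm rem (fun x => x) false).nodup_iff).mpr hnd
  have := hle.and hnd'
  exact this.imp (fun h => lt_of_le_of_ne h.1 h.2)

theorem sortI_erase (rem : List Int) (hnd : rem.Nodup) (v : Int) (_hv : v ∈ rem) :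
    sortI (rem.erase v) = (sortI rem).erase v := by
  apply PySem.List.sorted_eq_of_perm_of_pairwise_lt
  · exact ((PySem.List.sorted_perm rem (fun x => x) false).erase v)
  · exact List.Pairwise.sublist List.erase_sublist (pairwise_lt_sortI rem hnd)

theorem pvGet_prefix (a2 rest : List Int) (i : Int) (h0 : 0 ≤ i) (hi : i.toNat < a2.length) :
    pvGet (a2 ++ rest) i = pvGet a2 i := by
  simp [pvGet, PySem.List.pyGet?_of_nonneg _ h0, List.getElem?_append_left hi]

theorem pvCheck_prefix (c : String × Int × Int) (a2 rest : List Int)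
    (h : (c.1 = "lt" ∨ c.1 = "diff" ∨ c.1 = "adj") →
      0 ≤ c.2.1 ∧ c.2.1.toNat < a2.length ∧ 0 ≤ c.2.2 ∧ c.2.2.toNat < a2.length) :
    pvCheck (a2 ++ rest) c = pvCheck a2 c := by
  unfold pvCheck pvCheckV
  by_cases h1 : c.1 = "lt"
  · obtain ⟨hi0, hi, hj0, hj⟩ := h (Or.inl h1)
    simp [h1, pvGet_prefix _ _ _ hi0 hi, pvGet_prefix _ _ _ hj0 hj]
  · by_cases h2 : c.1 = "diff"
    · obtain ⟨hi0, hi, hj0, hj⟩ := h (Or.inr (Or.inl h2))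
      simp [h2, pvGet_prefix _ _ _ hi0 hi, pvGet_prefix _ _ _ hj0 hj]
    · by_cases h3 : c.1 = "adj"
      · obtain ⟨hi0, hi, hj0, hj⟩ := h (Or.inr (Or.inr h3))
        simp [h3, pvGet_prefix _ _ _ hi0 hi, pvGet_prefix _ _ _ hj0 hj]
      · simp [h1, h2, h3]

theorem pruneA_sound (cs : List (String × Int × Int)) (hpre : PreNN cs)
    (a : List Int) (v : Int) (rest : List Int)
    (hvalid : pvIsValid cs ((a ++ [v]) ++ rest) = true) :
    pruneA cs (a ++ [v]) ((a.length : Int)) = true := by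
  unfold pruneA
  rw [List.all_eq_true]
  intro c hc
  by_cases htr : ((c.2.2 == (a.length : Int) && decide (c.2.1 < (a.length : Int)))
      || (c.2.1 == (a.length : Int) && decide (c.2.2 < (a.length : Int)))) = true
  · rw [if_pos htr]
    have hcv : pvCheck ((a ++ [v]) ++ rest) c = true := by
      rw [pvIsValid, List.all_eq_true] at hvalid
      exact hvalid c hc
    rw [← pvCheck_prefix c (a ++ [v]) rest]
    · exact hcv
    · intro hrec
      obtain ⟨hi0, hj0⟩ := hpre c hc hrec
      simp only [Bool.or_eq_true, Bool.and_eq_true, beq_iff_eq, decide_eq_true_eq] at htr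
      have hlen : (a ++ [v]).length = a.length + 1 := by simp
      rcases htr with ⟨hj, hi⟩ | ⟨hi, hj⟩ <;>
        refine ⟨hi0, ?_, hj0, ?_⟩ <;> omega
  · rw [if_neg htr]

theorem specFind_base (cs : List (String × Int × Int)) (a : List Int) :
    specFind cs a [] = if pvIsValid cs a then some a else none := by
  unfold specFind
  rw [sortI_nil]
  have : perms1 [] = [[]] := by rfl
  rw [this]
  cases h : pvIsValid cs a <;> simp [h]

-- shared inductive step: a backtracking level equals specFind, given the chunk of each tried value
theorem specFind_step (cs : List (String × Int × Int)) (a rem : List Int) (hnd : rem.Nodup)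
    (hne : rem ≠ []) :
    specFind cs a rem
      = (sortI rem).findSome? (fun v =>
          (((perms1 (sortI (rem.erase v))).map (fun p => (a ++ [v]) ++ p)).find? (pvIsValid cs))) := by
  have hsnd : (sortI rem).Nodup := ((PySem.List.sorted_perm rem (fun x => x) false).nodup_iff).mpr hnd
  have hsne : sortI rem ≠ [] := by
    intro h
    have hp : (sortI rem).Perm rem := PySem.List.sorted_perm rem (fun x => x) false
    have hl := hp.length_eq
    rw [h] at hl
    exact hne (List.length_eq_zero_iff.mp hl.symm)
  unfold specFind
  rw [perms1_decomp (sortI rem) hsnd hsne, List.map_flatMap, find?_flatMap]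
  apply findSome?_ext
  intro v hv
  have hvrem : v ∈ rem := ((PySem.List.sorted_perm rem (fun x => x) false).mem_iff).mp hv
  rw [sortI_erase rem hnd v hvrem]
  congr 1
  rw [List.map_map]
  apply List.map_congr_left
  intro p _
  simp

theorem btA_spec (cs : List (String × Int × Int)) (hpre : PreNN cs) :
    ∀ (f : Nat) (a rem : List Int), rem.Nodup → rem.length = f →
      btA cs f a rem = specFind cs a rem := by
  intro f
  induction f with
  | zero =>
      intro a rem _ hlen
      have : rem = [] := List.length_eq_zero_iff.mp hlen
      subst this
      rw [specFind_base, btA]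
  | succ f ih =>
      intro a rem hnd hlen
      have hne : rem ≠ [] := by intro h; subst h; simp at hlen
      rw [btA, specFind_step cs a rem hnd hne]
      apply findSome?_ext
      intro v hv
      have hvrem : v ∈ rem := ((PySem.List.sorted_perm rem (fun x => x) false).mem_iff).mp hv
      by_cases hp : pruneA cs (a ++ [v]) ((a.length : Int)) = true
      · rw [if_pos hp]
        rw [ih (a ++ [v]) (rem.erase v) (hnd.erase v)
          (by rw [List.length_erase_of_mem hvrem, hlen]; rfl)]
        unfold specFind
        rfl
      · rw [if_neg hp]
        symm
        rw [List.find?_eq_none]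
        intro e he
        obtain ⟨p, _, rfl⟩ := List.mem_map.mp he
        intro hval
        exact hp (pruneA_sound cs hpre a v p hval)

theorem sortI_eq_self_of_pairwise (rem : List Int) (h : rem.Pairwise (· < ·)) : sortI rem = rem :=
  PySem.List.sorted_eq_self_of_pairwise rem (fun x => x) (h.imp le_of_lt)

-- A's n ≤ 8 permutation scan is specFind from the empty assignment
theorem small_branch_eq_specFind (cs : List (String × Int × Int)) (n : Int) :
    (PySem.List.permutations (PySem.List.pyRange 1 (n+1) 1)
      (PySem.List.pyRange 1 (n+1) 1).length).find? (fun p => pvIsValid cs p)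
      = specFind cs [] (PySem.List.pyRange 1 (n+1) 1) := by
  unfold specFind
  rw [sortI_eq_self_of_pairwise _ (PySem.List.pairwise_lt_pyRange_one 1 (n+1))]
  unfold perms1
  simp

-- ===== B-side lemmas =====

-- B's conflict is the negation of is_valid's per-constraint test
theorem conflictB_eq (t : String) (x y : Int) : conflictB t x y = !pvCheckV t x y := by
  unfold conflictB pvCheckV
  by_cases h1 : t == "lt"
  · by_cases hxy : y ≤ x
    · simp [h1, hxy, show ¬ x < y by omega]
    · simp [h1, hxy, show x < y by omega]
  · by_cases h2 : t == "diff"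
    · by_cases habs : |x - y| < 2
      · simp [h1, h2, habs, show ¬ 2 ≤ |x - y| by omega]
      · simp [h1, h2, habs, show 2 ≤ |x - y| by omega]
    · by_cases h3 : t == "adj"
      · by_cases hab : |x - y| = 1 <;> simp [h1, h2, h3, hab]
      · simp [h1, h2, h3]

theorem fullValidB_eq (cs : List (String × Int × Int)) (a : List Int) :
    fullValidB cs a = pvIsValid cs a := by
  unfold fullValidB pvIsValid
  congr 1
  funext c
  rw [pvCheck, conflictB_eq]
  by_cases h1 : c.1 == "lt"
  · simp [recogB, h1]
  · by_cases h2 : c.1 == "diff"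
    · simp [recogB, h1, h2]
    · by_cases h3 : c.1 == "adj"
      · simp [recogB, h1, h2, h3]
      · simp [recogB, pvCheckV, h1, h2, h3]

-- the single-constraint forward filter applied by slot k (value v) to a candidate w for future slot m
def okC (c : String × Int × Int) (k m v w : Int) : Bool :=
  !(recogB c.1 && ((c.2.1 == k && c.2.2 == m && conflictB c.1 v w) ||
                   (c.2.2 == k && c.2.1 == m && conflictB c.1 w v)))

-- a value w survives all forward filters from the assigned prefix a at future slot m
def surviveF (cs : List (String × Int × Int)) (a : List Int) (m w : Int) : Bool :=
  (PySem.List.enumerate a 0).all (fun p => cs.all (fun c => okC c p.1 m p.2 w))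

theorem surviveF_append (cs : List (String × Int × Int)) (a : List Int) (v m w : Int) :
    surviveF cs (a ++ [v]) m w
      = (surviveF cs a m w && cs.all (fun c => okC c ((a.length : Int)) m v w)) := by
  unfold surviveF
  rw [PySem.List.enumerate_append, List.all_append]
  simp [PySem.List.enumerate_cons, PySem.List.enumerate_nil]

theorem okC_true_of (c : String × Int × Int) (k m v w : Int)
    (h : ¬ (recogB c.1 = true ∧ ((c.2.1 = k ∧ c.2.2 = m) ∨ (c.2.2 = k ∧ c.2.1 = m)))) :
    okC c k m v w = true := by
  unfold okC
  by_cases hr : recogB c.1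
  · by_cases e1 : c.2.1 = k <;> by_cases e2 : c.2.2 = m <;>
      by_cases e3 : c.2.2 = k <;> by_cases e4 : c.2.1 = m <;> simp_all
  · simp [hr]

theorem updOne_map_range (c : String × Int × Int) (k v : Int) (g : Int → List Int) (L : Nat) :
    updOne k v ((PySem.List.pyRange (k+1) (k+1+(L : Nat)) 1).map g) c
      = (PySem.List.pyRange (k+1) (k+1+(L : Nat)) 1).map
          (fun m => (g m).filter (fun w => okC c k m v w)) := by
  have hlen : (PySem.List.pyRange (k+1) (k+1+(L : Nat)) 1).length = L := by
    rw [PySem.List.length_pyRange_one]; omega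
  unfold updOne
  by_cases hrec : recogB c.1
  · rw [if_neg (by simp [hrec])]
    by_cases h1 : (c.2.1 == k && decide (k < c.2.2)) = true
    · rw [if_pos h1]
      simp only [Bool.and_eq_true, beq_iff_eq, decide_eq_true_eq] at h1
      obtain ⟨h1a, h1b⟩ := h1
      apply List.ext_getElem (by simp [List.length_modify])
      intro idx hi1 hi2
      have hidxL : idx < L := by
        simpa [List.length_modify, hlen] using hi1
      rw [List.getElem_modify]
      simp only [List.getElem_map, PySem.List.getElem_pyRange_one]
      by_cases hidx : (c.2.2 - k - 1).toNat = idx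
      · rw [if_pos hidx]
        have hm : k + 1 + (idx : Int) = c.2.2 := by omega
        rw [hm]
        apply List.filter_congr
        intro w _
        unfold okC
        have hne : ¬ c.2.2 = k := by omega
        simp [hrec, h1a, hne]
      · rw [if_neg hidx]
        symm
        apply List.filter_eq_self.mpr
        intro w _
        apply okC_true_of
        rintro ⟨-, ⟨-, e2⟩ | ⟨e3, -⟩⟩ <;> omega
    · by_cases h2 : (c.2.2 == k && decide (k < c.2.1)) = true
      · rw [if_neg h1, if_pos h2]
        simp only [Bool.and_eq_true, beq_iff_eq, decide_eq_true_eq] at h2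
        obtain ⟨h2a, h2b⟩ := h2
        apply List.ext_getElem (by simp [List.length_modify])
        intro idx hi1 hi2
        have hidxL : idx < L := by
          simpa [List.length_modify, hlen] using hi1
        rw [List.getElem_modify]
        simp only [List.getElem_map, PySem.List.getElem_pyRange_one]
        by_cases hidx : (c.2.1 - k - 1).toNat = idx
        · rw [if_pos hidx]
          have hm : k + 1 + (idx : Int) = c.2.1 := by omega
          rw [hm]
          apply List.filter_congr
          intro w _
          unfold okC
          have hne : ¬ c.2.1 = k := by omega
          simp [hrec, h2a, hne]
        · rw [if_neg hidx]
          symm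
          apply List.filter_eq_self.mpr
          intro w _
          apply okC_true_of
          rintro ⟨-, ⟨e1, -⟩ | ⟨-, e4⟩⟩ <;> omega
      · rw [if_neg h1, if_neg h2]
        symm
        apply List.map_congr_left
        intro m hm
        have hm' : k + 1 ≤ m := ((PySem.List.mem_pyRange_one).mp hm).1
        apply List.filter_eq_self.mpr
        intro w _
        apply okC_true_of
        simp only [Bool.and_eq_true, beq_iff_eq, decide_eq_true_eq, not_and] at h1 h2
        rintro ⟨-, ⟨e1, e2⟩ | ⟨e3, e4⟩⟩
        · exact absurd (by omega : k < c.2.2) (by simpa [e1] using h1 e1)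
        · exact absurd (by omega : k < c.2.1) (by simpa [e3] using h2 e3)
  · rw [if_pos (by simp [hrec])]
    symm
    apply List.map_congr_left
    intro m _
    apply List.filter_eq_self.mpr
    intro w _
    exact okC_true_of c k m v w (fun h => hrec h.1)

theorem updDoms_map_range (k v : Int) (L : Nat) :
    ∀ (cs : List (String × Int × Int)) (g : Int → List Int),
      updDoms cs k v ((PySem.List.pyRange (k+1) (k+1+(L : Nat)) 1).map g)
        = (PySem.List.pyRange (k+1) (k+1+(L : Nat)) 1).map
            (fun m => (g m).filter (fun w => cs.all (fun c => okC c k m v w))) := by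
  intro cs
  induction cs with
  | nil =>
      intro g
      show (PySem.List.pyRange (k+1) (k+1+(L : Nat)) 1).map g = _
      symm
      apply List.map_congr_left
      intro m _
      simp
  | cons c t ih =>
      intro g
      have h : updDoms (c :: t) k v ((PySem.List.pyRange (k+1) (k+1+(L : Nat)) 1).map g)
          = updDoms t k v (updOne k v ((PySem.List.pyRange (k+1) (k+1+(L : Nat)) 1).map g) c) := rfl
      rw [h, updOne_map_range, ih (fun m => (g m).filter (fun w => okC c k m v w))]
      apply List.map_congr_left
      intro m _
      rw [List.filter_filter]
      apply List.filter_congr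
      intro w _
      rw [List.all_cons, Bool.and_comm]

theorem findSome?_filter_of_none {α β : Type} (p : α → Bool) (g : α → Option β) :
    ∀ l : List α, (∀ x ∈ l, p x = false → g x = none) →
      l.findSome? g = (l.filter p).findSome? g := by
  intro l
  induction l with
  | nil => simp
  | cons x t ih =>
      intro h
      by_cases hx : p x = true
      · rw [List.filter_cons_of_pos hx, List.findSome?_cons, List.findSome?_cons]
        cases g x with
        | some b => rfl
        | none => exact ih (fun y hy => h y (by simp [hy]))
      · have hx' : p x = false := by simpa using hx
        rw [List.filter_cons_of_neg (by simp [hx']), List.findSome?_cons,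
          h x (by simp) hx']
        exact ih (fun y hy => h y (by simp [hy]))

-- a forward-pruned value admits no valid completion: the conflicting constraint fails on every full assignment
theorem chunk_none_of_pruned (cs : List (String × Int × Int)) (a : List Int) (v : Int)
    (hs : surviveF cs a ((a.length : Int)) v = false) (rest : List Int) :
    pvIsValid cs ((a ++ [v]) ++ rest) = false := by
  rw [surviveF] at hs
  obtain ⟨p, hp, hpf⟩ := List.all_eq_false.mp hs
  have hpf : cs.all (fun c => okC c p.1 ((a.length : Int)) p.2 v) = false :=
    Bool.eq_false_iff.mpr hpf
  obtain ⟨c, hc, hcf⟩ := List.all_eq_false.mp hpf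
  have hcf : okC c p.1 ((a.length : Int)) p.2 v = false := Bool.eq_false_iff.mpr hcf
  obtain ⟨i, hi, rfl⟩ := (PySem.List.mem_enumerate_iff _ _ _).mp hp
  rw [okC] at hcf
  have hb : ∀ b : Bool, ((!b) = false) ↔ (b = true) := by decide
  rw [hb] at hcf
  simp only [Bool.and_eq_true, Bool.or_eq_true, beq_iff_eq] at hcf
  obtain ⟨hrec, hdisj⟩ := hcf
  have hget_i : pvGet ((a ++ [v]) ++ rest) ((0 : Int) + i) = a[i] := by
    have h0 : (0 : Int) + i = ((i : Nat) : Int) := by omega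
    rw [h0, pvGet, PySem.List.pyGet?_of_nonneg _ (by positivity)]
    have : (((i : Nat) : Int)).toNat = i := by omega
    rw [this, List.getElem?_append_left (by simp; omega), List.getElem?_append_left hi,
      List.getElem?_eq_getElem hi]
    rfl
  have hget_k : pvGet ((a ++ [v]) ++ rest) ((a.length : Int)) = v := by
    rw [pvGet, PySem.List.pyGet?_of_nonneg _ (by positivity)]
    have h1 : ((a.length : Int)).toNat = a.length := by omega
    rw [h1, List.getElem?_append_left (by simp), List.getElem?_concat_length]
    rfl
  rw [pvIsValid, List.all_eq_false]
  refine ⟨c, hc, ?_⟩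
  rw [pvCheck]
  rcases hdisj with ⟨⟨h1, h2⟩, hcb⟩ | ⟨⟨h1, h2⟩, hcb⟩
  · rw [h1, h2, hget_i, hget_k]
    rw [conflictB_eq] at hcb
    simp only [Bool.not_eq_true'] at hcb
    simp [hcb]
  · rw [h1, h2, hget_i, hget_k]
    rw [conflictB_eq] at hcb
    simp only [Bool.not_eq_true'] at hcb
    simp [hcb]

-- the forward-checking search computes specFind on the remaining values
theorem btF_spec (cs : List (String × Int × Int)) (vals : List Int)
    (hpw : vals.Pairwise (· < ·)) :
    ∀ (L : Nat) (a : List Int),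
      (vals.filter (fun w => decide (w ∉ a))).length = L →
      btF cs a ((PySem.List.pyRange ((a.length : Int)) ((a.length : Int) + (L : Nat)) 1).map
          (fun m => vals.filter (surviveF cs a m)))
        = specFind cs a (vals.filter (fun w => decide (w ∉ a))) := by
  intro L
  induction L with
  | zero =>
      intro a hlen
      have hrem : vals.filter (fun w => decide (w ∉ a)) = [] := List.length_eq_zero_iff.mp hlen
      rw [hrem, specFind_base]
      have : PySem.List.pyRange ((a.length : Int)) ((a.length : Int) + ((0 : Nat) : Nat)) 1 = [] := by
        apply PySem.List.pyRange_one_eq_nil; omega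
      rw [this, List.map_nil]
      simp only [btF]
      rw [fullValidB_eq]
  | succ L ih =>
      intro a hlen
      set rem := vals.filter (fun w => decide (w ∉ a)) with hremdef
      have hrempw : rem.Pairwise (· < ·) := List.Pairwise.sublist List.filter_sublist hpw
      have hremnd : rem.Nodup := hrempw.imp ne_of_lt
      have hremne : rem ≠ [] := by
        intro h; rw [h] at hlen; simp at hlen
      have hlt : (a.length : Int) < (a.length : Int) + ((L : Nat) + 1 : Nat) := by omega
      rw [PySem.List.pyRange_one_cons hlt, List.map_cons, btF]
      have he : (a.length : Int) + ((L : Nat) + 1 : Nat) = ((a.length : Int) + 1) + (L : Nat) := by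
        omega
      rw [he]
      rw [specFind_step cs a rem hremnd hremne, sortI_eq_self_of_pairwise rem hrempw]
      -- drop the used values skipped by the 'if v ∈ a' test
      rw [findSome?_filter_of_none (fun v => decide (v ∉ a)) _
        (vals.filter (surviveF cs a ((a.length : Int))))
        (by
          intro x _ hx
          have hxa : x ∈ a := by simpa using hx
          simp [hxa])]
      -- the head domain filtered by membership is rem filtered by the forward checks
      have hd0 : (vals.filter (surviveF cs a ((a.length : Int)))).filter (fun v => decide (v ∉ a))
          = rem.filter (surviveF cs a ((a.length : Int))) := by
        rw [hremdef, List.filter_filter, List.filter_filter]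
        apply List.filter_congr
        intro w _
        rw [Bool.and_comm]
      rw [hd0]
      rw [findSome?_filter_of_none (surviveF cs a ((a.length : Int)))
        (fun v => ((perms1 (sortI (rem.erase v))).map (fun p => (a ++ [v]) ++ p)).find? (pvIsValid cs))
        rem ?hnone]
      case hnone =>
        intro v hv hs
        rw [List.find?_eq_none]
        intro e he
        obtain ⟨p, _, rfl⟩ := List.mem_map.mp he
        simpa using chunk_none_of_pruned cs a v hs p
      apply findSome?_ext
      intro v hv
      have hvrem : v ∈ rem := List.mem_filter.mp hv |>.1
      have hvnotmem : v ∉ a := by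
        have := List.mem_filter.mp (hremdef ▸ hvrem)
        simpa using this.2
      rw [if_neg hvnotmem]
      -- rewrite the new domains as the invariant for a ++ [v]
      have hdoms : updDoms cs ((a.length : Int)) v
            ((PySem.List.pyRange ((a.length : Int) + 1) (((a.length : Int) + 1) + (L : Nat)) 1).map
              (fun m => vals.filter (surviveF cs a m)))
          = (PySem.List.pyRange (((a ++ [v]).length : Int))
              (((a ++ [v]).length : Int) + (L : Nat)) 1).map
            (fun m => vals.filter (surviveF cs (a ++ [v]) m)) := by
        rw [updDoms_map_range ((a.length : Int)) v L cs (fun m => vals.filter (surviveF cs a m))]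
        have hl : ((a ++ [v]).length : Int) = (a.length : Int) + 1 := by simp
        rw [hl]
        apply List.map_congr_left
        intro m _
        rw [List.filter_filter]
        apply List.filter_congr
        intro w _
        rw [surviveF_append]
        rw [Bool.and_comm]
      rw [hdoms]
      have hrem' : vals.filter (fun w => decide (w ∉ a ++ [v])) = rem.erase v := by
        rw [hremdef, List.Nodup.erase_eq_filter hremnd, List.filter_filter]
        apply List.filter_congr
        intro w _
        by_cases hwv : w = v
        · simp [hwv, hvnotmem]
        · by_cases hwa : w ∈ a <;> simp [hwa, hwv, bne]
      have hlen' : (vals.filter (fun w => decide (w ∉ a ++ [v]))).length = L := by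
        rw [hrem', List.length_erase_of_mem hvrem, hlen]
        rfl
      rw [ih (a ++ [v]) hlen', hrem']
      rw [sortI_erase rem hremnd v hvrem, sortI_eq_self_of_pairwise rem hrempw]
      unfold specFind
      rw [sortI_erase rem hremnd v hvrem, sortI_eq_self_of_pairwise rem hrempw]

theorem altB_eq_specFind (n : Int) (cs : List (String × Int × Int)) :
    solve_constraints_alt n cs
      = match specFind cs [] (PySem.List.pyRange 1 (n+1) 1) with
        | some r => r | none => [] := by
  have hfil : (PySem.List.pyRange 1 (n+1) 1).filter (fun w => decide (w ∉ ([] : List Int)))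
      = PySem.List.pyRange 1 (n+1) 1 := by simp
  have hsp := btF_spec cs (PySem.List.pyRange 1 (n+1) 1)
    (PySem.List.pairwise_lt_pyRange_one 1 (n+1)) ((PySem.List.pyRange 1 (n+1) 1).length) []
    (by rw [hfil])
  rw [hfil] at hsp
  have hdoms : List.replicate n.toNat (PySem.List.pyRange 1 (n+1) 1)
      = (PySem.List.pyRange (((([] : List Int).length : Nat) : Int))
          ((((([] : List Int).length : Nat) : Int)) + ((PySem.List.pyRange 1 (n+1) 1).length : Nat)) 1).map
          (fun m => (PySem.List.pyRange 1 (n+1) 1).filter (surviveF cs [] m)) := by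
    have h1 : ∀ m, (PySem.List.pyRange 1 (n+1) 1).filter (surviveF cs [] m)
        = PySem.List.pyRange 1 (n+1) 1 := by
      intro m
      apply List.filter_eq_self.mpr
      intro w _
      simp [surviveF, PySem.List.enumerate_nil]
    rw [List.map_congr_left (fun m _ => h1 m)]
    apply List.ext_getElem
    · rw [List.length_replicate, List.length_map, PySem.List.length_pyRange_one,
        PySem.List.length_pyRange_one]
      simp
      omega
    · intro i h1' h2'
      rw [List.getElem_replicate, List.getElem_map]
  unfold solve_constraints_alt
  rw [hdoms, hsp]

theorem solve_constraints_spec' (n : Int) (cs : List (String × Int × Int))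
    (hpre : Pre_solve_constraints n cs) :
    solve_constraints n cs = solve_constraints_alt n cs := by
  have hpw : (PySem.List.pyRange 1 (n+1) 1).Pairwise (· < ·) :=
    PySem.List.pairwise_lt_pyRange_one 1 (n+1)
  have hnd : (PySem.List.pyRange 1 (n+1) 1).Nodup := hpw.imp ne_of_lt
  have hB : solve_constraints_alt n cs
      = match specFind cs [] (PySem.List.pyRange 1 (n+1) 1) with
        | some r => r | none => [] := altB_eq_specFind n cs
  unfold solve_constraints
  by_cases hn : n ≤ 8
  · rw [if_pos hn, hB, small_branch_eq_specFind cs n]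
  · have hnn : PreNN cs := fun c hc hrec => by
      have h := hpre c hc hrec
      rw [if_neg hn] at h
      exact ⟨h.1, h.2.2.1⟩
    rw [if_neg hn, hB]
    rw [PySem.Set.ofList_eq_self_of_nodup (PySem.List.pyRange 1 (n+1) 1) hnd,
      btA_spec cs hnn _ [] _ hnd rfl]

-- ===== VERDICT (by name: the statement is the Claim_ definition above) =====
theorem solve_constraints_spec : Claim_equal_solve_constraints := by
  intro n cs _ hpre
  unfold Spec_solve_constraints
  exact solve_constraints_spec' n cs hpre
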